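-- pv_equiv track=rewrite | github.com/Alandroid/img-compression-mps | src/imgcompressionmps/utils/core.py | balance_factors
-- ===== SOURCE A (Python) =====
-- from typing import List, Sequence, Tuple
--
-- def balance_factors(factors: List[int], target_num: int) -> List[int]:
--     """
--     Balance a list of factors to match a target number of entries.
--
--     Parameters
--     ----------
--     factors : List[int]
--         Prime factor list for one tensor dimension.
--     target_num : int
--         Desired final length of the factor list.
--
--     Returns
--     -------
--     List[int]
--         Balanced factor list of length target_num.
--
--     Raises
--     ------
--     ValueError
--         If target_num is negative or zero when factors are non-empty.
--     """
--     if target_num < 0: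
--         raise ValueError("target_num must be non-negative.")
--     if target_num == 0 and len(factors) > 0:
--         raise ValueError("Cannot reduce non-empty factor list to length zero.")
--
--     factors = sorted(factors)
--
--     if len(factors) > target_num:
--         while len(factors) > target_num:
--             smallest = factors.pop(0)
--             next_smallest = factors.pop(0)
--             factors.insert(0, smallest * next_smallest)
--             factors.sort()
--     elif len(factors) < target_num:
--         factors += [1] * (target_num - len(factors))
--
--     return sorted(factors)
-- ===== SOURCE B (Python) =====
-- import heapq
-- from typing import List
--
--
-- def balance_factors(factors: List[int], target_num: int) -> List[int]:
--     """Balance a factor list to target_num entries using a binary min-heap: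
--     heapify once, then pop the two smallest and push their product until the
--     target length is reached (no sorting inside the loop)."""
--     if target_num < 0:
--         raise ValueError("target_num must be non-negative.")
--     if target_num == 0 and len(factors) > 0:
--         raise ValueError("Cannot reduce non-empty factor list to length zero.")
--
--     heap = list(factors)
--     heapq.heapify(heap)
--     while len(heap) > target_num:
--         a = heapq.heappop(heap)
--         b = heapq.heappop(heap)
--         heapq.heappush(heap, a * b)
--     heap += [1] * (target_num - len(heap))
--     return sorted(heap)
-- ===== Notes on version B (the rewrite author's own statement) =====
-- stated objective: faster
-- what changed: A keeps a sorted list and fully re-sorts it after every merge of the two smallest factors; B replaces the sorted list by a binary min-heap (heapq): heapify once, then each merge is two pops and one push, with a single final sort.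
-- outside the precondition, e.g. on balance_factors([2, 3], 0): A raises ValueError, B raises ValueError; on balance_factors([2], -1): A raises ValueError, B raises ValueError
import Mathlib
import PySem

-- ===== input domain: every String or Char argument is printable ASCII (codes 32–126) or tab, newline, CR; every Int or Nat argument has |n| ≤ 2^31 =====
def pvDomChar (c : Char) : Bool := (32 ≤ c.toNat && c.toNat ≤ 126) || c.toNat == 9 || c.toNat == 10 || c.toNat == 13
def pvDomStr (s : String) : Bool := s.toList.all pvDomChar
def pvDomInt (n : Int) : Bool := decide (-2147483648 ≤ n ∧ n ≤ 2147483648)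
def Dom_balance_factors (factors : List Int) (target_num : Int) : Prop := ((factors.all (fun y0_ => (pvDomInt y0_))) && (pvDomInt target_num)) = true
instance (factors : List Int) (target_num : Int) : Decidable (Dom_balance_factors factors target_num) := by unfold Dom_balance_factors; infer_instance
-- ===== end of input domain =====

-- B replaces A's sorted list (fully re-sorted after every merge) by a binary min-heap:
-- heapify once, pop-pop-push per merge, one final sort (return-value equivalence;
-- neither program mutates its arguments observably).


-- ===== PORT A =====
-- while len(factors) > target_num: pop two smallest, insert product at front, factors.sort()
def pvALoop (fs : List Int) (target : Int) : List Int :=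
  if target < (fs.length : Int) then
    match fs with
    | p :: q :: rest => pvALoop (PySem.List.sorted (p * q :: rest) (fun x => x) false) target
    | other => other          -- unreachable inside Pre_ (Python would raise IndexError)
  else fs
termination_by fs.length
decreasing_by simp [PySem.List.length_sorted]

def balance_factors (factors : List Int) (target_num : Int) : List Int :=
  -- the two ValueError branches are excluded by Pre_balance_factors
  let fs := PySem.List.sorted factors (fun x => x) false
  let fs2 :=
    if target_num < (fs.length : Int) then pvALoop fs target_num
    else if (fs.length : Int) < target_num then
      fs ++ List.replicate (target_num - fs.length).toNat 1     -- factors += [1] * (target_num - len(factors))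
    else fs
  PySem.List.sorted fs2 (fun x => x) false                      -- return sorted(factors)

-- ===== PORT B =====
-- heapq.heappop ported by its stdlib contract on Int elements: remove and return a
-- minimum value of the heap's contents (exact: the heap layout is internal to heapq,
-- and which copy of a duplicated minimum is removed cannot affect any Int result)
def pvHeapPop (l : List Int) : Option (Int × List Int) :=
  match l.min? with
  | some m => some (m, l.erase m)
  | none => none              -- heappop on an empty heap raises IndexError

-- cited by pvBLoop's decreasing_by: each pop removes one element
theorem pvHeapPop_length (l : List Int) (a : Int) (r : List Int)
    (h : pvHeapPop l = some (a, r)) : r.length + 1 = l.length := by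
  unfold pvHeapPop at h
  match hm : l.min? with
  | none => rw [hm] at h; exact absurd h (by simp)
  | some m =>
    rw [hm] at h
    have hmem : m ∈ l := (List.min?_eq_some_iff.mp hm).1
    have := List.length_erase_of_mem hmem
    have hl : 0 < l.length := List.length_pos_of_mem hmem
    simp only [Option.some.injEq, Prod.mk.injEq] at h
    rw [← h.2, this]; omega

-- while len(heap) > target: a = heappop; b = heappop; heappush(heap, a*b)
def pvBLoop (hp : List Int) (target : Int) : List Int :=
  if target < (hp.length : Int) then
    match h1 : pvHeapPop hp with
    | some (a, r) =>
      match h2 : pvHeapPop r with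
      | some (b, r2) => pvBLoop (r2 ++ [a * b]) target
      | none => hp            -- unreachable inside Pre_ (Python would raise IndexError)
    | none => hp
  else hp
termination_by hp.length
decreasing_by
  have e1 := pvHeapPop_length _ _ _ h1
  have e2 := pvHeapPop_length _ _ _ h2
  simp only [List.length_append, List.length_cons, List.length_nil]
  omega

def balance_factors_alt (factors : List Int) (target_num : Int) : List Int :=
  -- heapq.heapify only rearranges the list into heap layout; its contents are the
  -- same multiset, so the port starts the loop from the list itself
  let hp := pvBLoop factors target_num
  -- heap += [1] * (target_num - len(heap)); return sorted(heap)
  PySem.List.sorted (hp ++ List.replicate (target_num - hp.length).toNat 1) (fun x => x) false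

-- ===== PRECONDITION & SPEC =====
-- Pre_ excludes exactly the inputs on which Python A raises ValueError:
-- a negative target_num, or target_num = 0 with a non-empty factor list.
def Pre_balance_factors (factors : List Int) (target_num : Int) : Prop :=
  0 ≤ target_num ∧ (target_num = 0 → factors = [])
instance (factors : List Int) (target_num : Int) : Decidable (Pre_balance_factors factors target_num) := by
  unfold Pre_balance_factors; infer_instance

def pvWitness_balance_factors : List Int × Int := ([6, 2, 3], 2)

def Spec_balance_factors (factors : List Int) (target_num : Int) (out : List Int) : Prop :=
  out = balance_factors_alt factors target_num
instance (factors : List Int) (target_num : Int) (out : List Int) : Decidable (Spec_balance_factors factors target_num out) := by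
  unfold Spec_balance_factors; infer_instance

-- ===== CLAIM (what is proved, stated in full; the proofs are below) =====
def Claim_equal_balance_factors : Prop := ∀ (factors : List Int) (target_num : Int), Dom_balance_factors factors target_num → Pre_balance_factors factors target_num → Spec_balance_factors factors target_num (balance_factors factors target_num)

-- ===== LEMMAS AND PROOFS =====

-- popping from any rearrangement of a sorted nonempty list yields its head and a
-- rearrangement of its tail
theorem pvHeapPop_of_perm_sorted (hp : List Int) (p : Int) (tl : List Int)
    (hperm : hp.Perm (p :: tl)) (hsorted : (p :: tl).Pairwise (· ≤ ·)) :
    ∃ r, pvHeapPop hp = some (p, r) ∧ r.Perm tl := by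
  have hmin : hp.min? = some p := by
    refine List.min?_eq_some_iff.mpr ⟨hperm.mem_iff.mpr (List.mem_cons_self), ?_⟩
    intro b hb
    rcases List.mem_cons.mp (hperm.mem_iff.mp hb) with h | h
    · exact le_of_eq h.symm
    · exact (List.pairwise_cons.mp hsorted).1 b h
  refine ⟨hp.erase p, ?_, ?_⟩
  · unfold pvHeapPop; rw [hmin]
  · have := hperm.erase p
    rwa [List.erase_cons_head] at this

-- the two loops produce rearrangements of each other
theorem loops_perm (n : Nat) : ∀ (fs hp : List Int) (target : Int), fs.length ≤ n →
    fs.Pairwise (· ≤ ·) → hp.Perm fs →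
    (pvBLoop hp target).Perm (pvALoop fs target) := by
  induction n with
  | zero =>
    intro fs hp target hlen hpair hperm
    have hfs : fs = [] := by cases fs <;> simp_all
    subst hfs
    have hhp : hp = [] := List.perm_nil.mp hperm
    subst hhp
    rw [pvBLoop.eq_def, pvALoop.eq_def]
    by_cases hc : target < ((([] : List Int)).length : Int)
    · simp only [if_pos hc]
      simp [pvHeapPop]
    · simp only [if_neg hc]
      exact hperm
  | succ n ih =>
    intro fs hp target hlen hpair hperm
    have hlen_eq : hp.length = fs.length := hperm.length_eq
    rw [pvBLoop.eq_def, pvALoop.eq_def, hlen_eq]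
    by_cases hc : target < (fs.length : Int)
    · simp only [if_pos hc]
      match fs with
      | [] =>
        have hhp : hp = [] := List.perm_nil.mp hperm
        subst hhp
        simp [pvHeapPop]
      | [x] =>
        have hhp : hp = [x] := List.perm_singleton.mp hperm
        subst hhp
        have h1 : pvHeapPop [x] = some (x, []) := by simp [pvHeapPop, List.min?]
        split
        · next a r heq =>
          rw [h1] at heq
          injection heq with heq
          obtain ⟨rfl, rfl⟩ := Prod.mk.inj heq
          split
          · next b r2 heq2 => exact absurd heq2 (by simp [pvHeapPop])
          · next => exact List.Perm.refl _
        · next heq => simp [h1] at heq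
      | p :: q :: rest =>
        obtain ⟨r, hr, hrperm⟩ := pvHeapPop_of_perm_sorted hp p (q :: rest) hperm hpair
        obtain ⟨r2, hr2, hr2perm⟩ := pvHeapPop_of_perm_sorted r q rest hrperm
          (List.pairwise_cons.mp hpair).2
        simp only []
        split
        · next a r' heq =>
          rw [hr] at heq
          injection heq with heq
          obtain ⟨rfl, rfl⟩ := Prod.mk.inj heq
          split
          · next b r2' heq2 =>
            rw [hr2] at heq2
            injection heq2 with heq2
            obtain ⟨rfl, rfl⟩ := Prod.mk.inj heq2
            refine ih _ _ target ?_ ?_ ?_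
            · rw [PySem.List.length_sorted]
              simp at hlen ⊢; omega
            · simpa using PySem.List.sorted_pairwise (p * q :: rest) (fun x => x)
            · exact ((hr2perm.append_right [p * q]).trans
                (List.perm_append_singleton _ _)).trans
                (PySem.List.sorted_perm _ _ _).symm
          · next heq2 => simp [hr2] at heq2
        · next heq => simp [hr] at heq
    · simp only [if_neg hc]
      exact hperm

-- if the loop was entered, its result is never shorter than the target
theorem pvALoop_length_ge : ∀ (fs : List Int) (target : Int), target < (fs.length : Int) →
    target ≤ ((pvALoop fs target).length : Int)
  | [], t, h => by
    rw [pvALoop.eq_def, if_pos h]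
    show t ≤ ((([] : List Int)).length : Int)
    simp at h ⊢; omega
  | [x], t, h => by
    rw [pvALoop.eq_def, if_pos h]
    show t ≤ ((([x] : List Int)).length : Int)
    simp at h ⊢; omega
  | p :: q :: rest, t, h => by
    rw [pvALoop.eq_def, if_pos h]
    show t ≤ ((pvALoop (PySem.List.sorted (p * q :: rest) (fun x => x) false) t).length : Int)
    by_cases h2 : t < ((PySem.List.sorted (p * q :: rest) (fun x => x) false).length : Int)
    · exact pvALoop_length_ge _ t h2
    · rw [pvALoop.eq_def, if_neg h2]
      simp [PySem.List.length_sorted] at h ⊢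
      omega
termination_by fs _ _ => fs.length
decreasing_by simp [PySem.List.length_sorted]

-- ===== VERDICT (by name: the statement is the Claim_ definition above) =====
theorem balance_factors_spec : Claim_equal_balance_factors := by
  intro factors target_num _ _
  unfold Spec_balance_factors
  simp only [balance_factors, balance_factors_alt]
  set fs := PySem.List.sorted factors (fun x => x) false with hfs
  have hperm : factors.Perm fs := (PySem.List.sorted_perm factors (fun x => x) false).symm
  have hpair : fs.Pairwise (· ≤ ·) := by
    simpa using PySem.List.sorted_pairwise factors (fun x => x)
  have hlen_eq : factors.length = fs.length := hperm.length_eq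
  by_cases hgt : target_num < (fs.length : Int)
  · -- merging branch: the two loops give rearrangements of each other, no padding
    have hloop : (pvBLoop factors target_num).Perm (pvALoop fs target_num) :=
      loops_perm fs.length fs factors target_num le_rfl hpair hperm
    have hge := pvALoop_length_ge fs target_num hgt
    have hpad : (target_num - (pvBLoop factors target_num).length).toNat = 0 := by
      have := hloop.length_eq
      omega
    rw [if_pos hgt, hpad]
    simp only [List.replicate_zero, List.append_nil]
    exact PySem.List.sorted_eq_sorted_of_perm _ _ _ (fun a b h => h) hloop.symm
  · -- no merge: B's loop is the identity; both sides sort rearranged padded lists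
    have hid : pvBLoop factors target_num = factors := by
      rw [pvBLoop.eq_def, if_neg (by omega)]
    rw [hid, if_neg hgt]
    by_cases hlt : (fs.length : Int) < target_num
    · rw [if_pos hlt, hlen_eq]
      exact PySem.List.sorted_eq_sorted_of_perm _ _ _ (fun a b h => h)
        (hperm.symm.append_right _)
    · have hpad : (target_num - factors.length).toNat = 0 := by omega
      rw [if_neg hlt, hpad]
      simp only [List.replicate_zero, List.append_nil]
      exact PySem.List.sorted_eq_sorted_of_perm _ _ _ (fun a b h => h) hperm.symm
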